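-- pv_equiv track=rewrite | github.com/potfit/potfit | util/devel/check_potfit.py | get_number_of_targets
-- ===== SOURCE A (Python) =====
-- from itertools import chain, combinations
--
-- def all_subsets(subset):
--     return chain(*map(lambda x: combinations(subset, x), range(0, len(subset) + 1)))
--
-- def get_number_of_targets(interactions, options, special_options):
--     count = 0
--     for interaction in interactions:
--         option_list = options[:]
--         for special_option in special_options:
--             if special_option[0] == interaction:
--                 option_list += special_option[1]
--                 break
--         count += sum(1 for x in all_subsets(option_list))
--     return count
-- ===== SOURCE B (Python) =====
-- def get_number_of_targets(interactions, options, special_options):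
--     extra = {}
--     for key, vals in special_options:
--         extra.setdefault(key, vals)
--     base = len(options)
--     return sum(2 ** (base + len(extra.get(i, []))) for i in interactions)
-- ===== Notes on version B (the rewrite author's own statement) =====
-- stated objective: faster
-- what changed: Replaces per-interaction enumeration of all subsets of the option list with the closed form 2**n, and replaces the inner scan of special_options with a first-occurrence dict built once.
import Mathlib
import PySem

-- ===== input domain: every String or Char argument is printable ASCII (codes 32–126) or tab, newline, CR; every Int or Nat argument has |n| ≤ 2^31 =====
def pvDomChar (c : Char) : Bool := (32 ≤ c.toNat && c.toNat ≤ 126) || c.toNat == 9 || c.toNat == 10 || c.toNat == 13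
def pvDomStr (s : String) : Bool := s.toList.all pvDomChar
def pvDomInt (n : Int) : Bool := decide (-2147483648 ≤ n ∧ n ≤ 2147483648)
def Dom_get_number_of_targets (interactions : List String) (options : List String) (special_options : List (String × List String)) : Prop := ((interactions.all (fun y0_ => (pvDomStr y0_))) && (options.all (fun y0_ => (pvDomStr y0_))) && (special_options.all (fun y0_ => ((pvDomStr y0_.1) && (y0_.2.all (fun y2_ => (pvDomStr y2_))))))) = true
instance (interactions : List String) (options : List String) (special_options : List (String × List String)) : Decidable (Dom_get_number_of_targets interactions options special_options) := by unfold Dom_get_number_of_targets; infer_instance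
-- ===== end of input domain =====

-- B replaces A's per-interaction enumeration of all subsets with the closed form 2^n
-- and A's inner scan of special_options with a first-occurrence dict built once (faster).


-- ===== PORT A =====
-- the inner 'for special_option in special_options: … break' loop of A
def pvFindExtra : List (String × List String) → String → List String
  | [], _ => []
  | p :: rest, interaction => if p.1 == interaction then p.2 else pvFindExtra rest interaction

-- itertools.combinations(l, x) is ported as List.sublistsLen x l (same elements, only the count is used);
-- all_subsets is the chain over x in range(0, len(l)+1), counted term by term as in 'sum(1 for x in …)'
def get_number_of_targets (interactions : List String) (options : List String) (special_options : List (String × List String)) : Int :=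
  interactions.foldl
    (fun count interaction =>
      let option_list := options ++ pvFindExtra special_options interaction
      count + ((List.range (option_list.length + 1)).map
        (fun x => ((List.sublistsLen x option_list).length : Int))).sum)
    0

-- ===== PORT B =====
def get_number_of_targets_alt (interactions : List String) (options : List String) (special_options : List (String × List String)) : Int :=
  let extra : PySem.Dict String (List String) :=
    special_options.foldl (fun d p => d.setdefault p.1 p.2) PySem.Dict.empty
  let base := options.length
  (interactions.map (fun i => ((2 : Int) ^ (base + ((extra.get? i).getD []).length)))).sum

-- ===== PRECONDITION & SPEC =====
def Spec_get_number_of_targets (interactions : List String) (options : List String) (special_options : List (String × List String)) (out : Int) : Prop := out = get_number_of_targets_alt interactions options special_options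
instance (interactions : List String) (options : List String) (special_options : List (String × List String)) (out : Int) : Decidable (Spec_get_number_of_targets interactions options special_options out) := by unfold Spec_get_number_of_targets; infer_instance

-- ===== CLAIM (what is proved, stated in full; the proofs are below) =====
def Claim_equal_get_number_of_targets : Prop := ∀ (interactions : List String) (options : List String) (special_options : List (String × List String)), Dom_get_number_of_targets interactions options special_options → Spec_get_number_of_targets interactions options special_options (get_number_of_targets interactions options special_options)

-- ===== LEMMAS AND PROOFS =====

-- B's dict, built by setdefault over the association list, looks up the FIRST match — exactly A's loop-with-break
theorem get?_fold_setdefault (l : List (String × List String)) (d : PySem.Dict String (List String)) (k : String) :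
    ((l.foldl (fun d p => d.setdefault p.1 p.2) d).get? k)
      = ((d.get? k).or (some (pvFindExtra l k)) |>.filter (fun _ => (d.get? k).isSome || (l.any (fun p => p.1 == k)))) := by
  induction l generalizing d with
  | nil =>
    cases h : d.get? k <;> simp [pvFindExtra, h, Option.filter]
  | cons p rest ih =>
    simp only [List.foldl_cons]
    rw [ih]
    by_cases hc : d.contains p.1
    · rw [PySem.Dict.setdefault_of_contains _ _ hc]
      by_cases hk : p.1 = k
      · have : (d.get? k).isSome := by
          rw [← hk]; rw [PySem.Dict.contains_eq_isSome_get?] at hc; exact hc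
        cases hg : d.get? k
        · simp [hg] at this
        · simp [pvFindExtra, hk, Option.filter]
      · simp [pvFindExtra, List.any_cons, show (p.1 == k) = false by simp [hk]]
    · have hc' : d.contains p.1 = false := by simpa using hc
      rw [PySem.Dict.setdefault_of_not_contains _ _ hc']
      by_cases hk : p.1 = k
      · subst hk
        have hg : d.get? p.1 = none := by
          rw [PySem.Dict.contains_eq_isSome_get?] at hc'
          simpa [Option.isSome_iff_exists] using hc'
        simp [PySem.Dict.get?_insert_self, hg, pvFindExtra, Option.filter]
      · rw [PySem.Dict.get?_insert_of_ne _ _ (fun h => hk h.symm)]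
        simp [pvFindExtra, show (p.1 == k) = false by simp [hk]]

theorem get?_fold_setdefault_getD (l : List (String × List String)) (k : String) :
    (((l.foldl (fun d p => d.setdefault p.1 p.2) PySem.Dict.empty).get? k).getD [])
      = pvFindExtra l k := by
  rw [get?_fold_setdefault]
  have he : (PySem.Dict.empty : PySem.Dict String (List String)).get? k = none := rfl
  rw [he]
  by_cases h : l.any (fun p => p.1 == k)
  · simp [h, Option.filter]
  · simp only [Option.or, Option.filter, Bool.false_or, Option.isSome_none]
    have hfe : pvFindExtra l k = [] := by
      induction l with
      | nil => rfl
      | cons p rest ih =>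
        simp only [List.any_cons, Bool.or_eq_true, not_or] at h
        simp [pvFindExtra, show (p.1 == k) = false by simpa using h.1, ih h.2]
    simp [h, hfe]

-- counting all subsets of l, size by size, gives 2^|l|
theorem count_all_subsets (l : List String) :
    ((List.range (l.length + 1)).map (fun x => ((List.sublistsLen x l).length : Int))).sum
      = 2 ^ l.length := by
  simp only [List.length_sublistsLen]
  have h2 : ((List.range (l.length + 1)).map (fun x => ((l.length.choose x : Nat) : Int))).sum
      = ∑ i ∈ Finset.range (l.length + 1), ((l.length.choose i : Nat) : Int) := rfl
  rw [h2, ← Nat.cast_sum, Nat.sum_range_choose]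
  push_cast
  ring

-- ===== VERDICT (by name: the statement is the Claim_ definition above) =====
theorem get_number_of_targets_spec : Claim_equal_get_number_of_targets := by
  intro interactions options special_options _
  unfold Spec_get_number_of_targets get_number_of_targets get_number_of_targets_alt
  rw [PySem.List.foldl_add interactions
    (fun interaction => ((List.range ((options ++ pvFindExtra special_options interaction).length + 1)).map
      (fun x => ((List.sublistsLen x (options ++ pvFindExtra special_options interaction)).length : Int))).sum) 0]
  rw [zero_add]
  congr 1
  apply List.map_congr_left
  intro i _
  rw [count_all_subsets, get?_fold_setdefault_getD]
  simp [List.length_append, pow_add]
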